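-- pv_equiv track=rewrite | github.com/vnherdeiro/project-euler | p265v2.py | filterDiffSlicesV2
-- ===== SOURCE A (Python) =====
-- N = 5
--
-- def filterDiffSlicesV2( theStr):
-- 	exStr = theStr + theStr[:N]
-- 	s = set()
-- 	for i in range( len(theStr)):
-- 		cyc = exStr[i:i+N]
-- 		if cyc in s:
-- 			return False
-- 		else:
-- 			s.add( cyc)
-- 	return True
-- ===== SOURCE B (Python) =====
-- N = 5
--
-- def filterDiffSlicesV2(theStr):
--     exStr = theStr + theStr[:N]
--     slices = [exStr[i:i+N] for i in range(len(theStr))]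
--     slices.sort()
--     for prev, cur in zip(slices, slices[1:]):
--         if prev == cur:
--             return False
--     return True
-- ===== Notes on version B (the rewrite author's own statement) =====
-- stated objective: alternative
-- what changed: Replaces the incremental hash-set membership loop with building all length-5 cyclic slices at once, sorting them, and scanning adjacent pairs for an equal neighbour.
import Mathlib
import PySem

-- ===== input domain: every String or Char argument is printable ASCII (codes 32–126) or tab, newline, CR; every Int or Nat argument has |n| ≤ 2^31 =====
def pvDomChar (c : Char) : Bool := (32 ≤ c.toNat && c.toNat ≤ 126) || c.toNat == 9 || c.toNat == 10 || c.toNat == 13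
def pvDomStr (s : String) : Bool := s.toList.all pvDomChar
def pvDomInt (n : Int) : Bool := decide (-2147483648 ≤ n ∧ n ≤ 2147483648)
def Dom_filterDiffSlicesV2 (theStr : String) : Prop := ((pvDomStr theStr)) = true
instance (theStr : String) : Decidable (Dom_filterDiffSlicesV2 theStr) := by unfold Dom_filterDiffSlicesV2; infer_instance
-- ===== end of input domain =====

-- B replaces A's incremental hash-set duplicate check by sort-then-adjacent-scan over the
-- list of all length-5 cyclic slices (alternative algorithm, not claimed faster).

-- ===== PORT A =====
-- the loop 'for i in range(len(theStr)): …' with early return False, carrying the set s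
def pvLoopA (ex : List Char) : List Int → PySem.Set (List Char) → Bool
  | [], _ => true
  | i :: rest, s =>
    let cyc := PySem.List.slice ex (some i) (some (i + 5))
    if PySem.Set.contains s cyc then false
    else pvLoopA ex rest (PySem.Set.add s cyc)

def filterDiffSlicesV2 (theStr : String) : Bool :=
  let cs := theStr.toList
  let ex := cs ++ PySem.List.slice cs none (some 5)     -- exStr = theStr + theStr[:N]
  pvLoopA ex (PySem.List.pyRange 0 (cs.length : Int) 1) PySem.Set.empty

-- ===== PORT B =====
-- single pass over adjacent pairs of the sorted slice list (zip(slices, slices[1:]))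
def pvScanAdj : List (List Char) → Bool
  | [] => true
  | [_] => true
  | a :: b :: t => if a == b then false else pvScanAdj (b :: t)

def filterDiffSlicesV2_alt (theStr : String) : Bool :=
  let cs := theStr.toList
  let ex := cs ++ PySem.List.slice cs none (some 5)     -- exStr = theStr + theStr[:N]
  let slices := (PySem.List.pyRange 0 (cs.length : Int) 1).map
      (fun i => PySem.List.slice ex (some i) (some (i + 5)))
  pvScanAdj (PySem.List.sorted slices (fun x => x) false)

-- ===== PRECONDITION & SPEC =====
def Spec_filterDiffSlicesV2 (theStr : String) (out : Bool) : Prop := out = filterDiffSlicesV2_alt theStr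
instance (theStr : String) (out : Bool) : Decidable (Spec_filterDiffSlicesV2 theStr out) := by unfold Spec_filterDiffSlicesV2; infer_instance

-- ===== CLAIM (what is proved, stated in full; the proofs are below) =====
def Claim_equal_filterDiffSlicesV2 : Prop := ∀ (theStr : String), Dom_filterDiffSlicesV2 theStr → Spec_filterDiffSlicesV2 theStr (filterDiffSlicesV2 theStr)

-- ===== LEMMAS AND PROOFS =====

-- invariant of A's loop: it returns true iff the slices it visits are distinct and disjoint from s
theorem pvLoopA_iff (ex : List Char) (idxs : List Int) (s : PySem.Set (List Char)) :
    pvLoopA ex idxs s = true ↔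
      ((idxs.map (fun i => PySem.List.slice ex (some i) (some (i + 5)))).Nodup ∧
       ∀ x ∈ idxs.map (fun i => PySem.List.slice ex (some i) (some (i + 5))), x ∉ s) := by
  induction idxs generalizing s with
  | nil => simp [pvLoopA]
  | cons i rest ih =>
    by_cases h : PySem.List.slice ex (some i) (some (i + 5)) ∈ s
    · rw [show pvLoopA ex (i :: rest) s = false from by
        simp only [pvLoopA]
        rw [if_pos ((PySem.Set.contains_iff s _).mpr h)]]
      simp only [List.map_cons, List.mem_cons]
      constructor
      · intro hf; cases hf
      · rintro ⟨_, hmem⟩; exact absurd h (hmem _ (Or.inl rfl))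
    · have hc : PySem.Set.contains s (PySem.List.slice ex (some i) (some (i + 5))) = false := by
        rw [Bool.eq_false_iff]
        intro hb
        exact h ((PySem.Set.contains_iff s _).mp hb)
      rw [show pvLoopA ex (i :: rest) s
            = pvLoopA ex rest (s.add (PySem.List.slice ex (some i) (some (i + 5)))) from by
          simp only [pvLoopA]
          rw [hc, if_neg Bool.false_ne_true]]
      rw [ih]
      simp only [List.map_cons, List.nodup_cons, List.mem_cons]
      constructor
      · rintro ⟨hnd, hdisj⟩
        refine ⟨⟨fun hm => ?_, hnd⟩, ?_⟩
        · exact absurd ((PySem.Set.mem_add s _ _).mpr (Or.inr rfl)) (hdisj _ hm)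
        · rintro x (rfl | hx)
          · exact h
          · intro hxs
            exact hdisj x hx ((PySem.Set.mem_add s _ _).mpr (Or.inl hxs))
      · rintro ⟨⟨hni, hnd⟩, hdisj⟩
        refine ⟨hnd, fun x hx hxadd => ?_⟩
        rcases (PySem.Set.mem_add s _ _).mp hxadd with hxs | rfl
        · exact hdisj x (Or.inr hx) hxs
        · exact hni hx

-- on a ≤-sorted list, no equal adjacent pair means no duplicates at all
theorem pvScanAdj_iff (l : List (List Char)) (hp : l.Pairwise (· ≤ ·)) :
    pvScanAdj l = true ↔ l.Nodup := by
  induction l with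
  | nil => simp [pvScanAdj]
  | cons a t ih =>
    cases t with
    | nil => simp [pvScanAdj]
    | cons b t' =>
      rcases List.pairwise_cons.mp hp with ⟨hale, hp'⟩
      rcases List.pairwise_cons.mp hp' with ⟨hble, _⟩
      by_cases hab : a = b
      · subst hab
        simp [pvScanAdj, List.nodup_cons]
      · have hbeq : (a == b) = false := by simp [hab]
        simp only [pvScanAdj, hbeq, if_neg Bool.false_ne_true, ih hp', List.nodup_cons,
          List.mem_cons]
        constructor
        · intro hnd
          refine ⟨?_, hnd⟩
          rintro (rfl | hat)
          · exact hab rfl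
          · have h1 : a ≤ b := hale b (List.mem_cons_self ..)
            have h2 : b ≤ a := hble a hat
            exact hab (le_antisymm h1 h2)
        · exact fun ⟨_, hnd⟩ => hnd

theorem filterDiffSlicesV2_eq (theStr : String) :
    filterDiffSlicesV2 theStr = filterDiffSlicesV2_alt theStr := by
  unfold filterDiffSlicesV2 filterDiffSlicesV2_alt
  set cs := theStr.toList
  set ex := cs ++ PySem.List.slice cs none (some 5) with hex
  set L := (PySem.List.pyRange 0 (cs.length : Int) 1).map
      (fun i => PySem.List.slice ex (some i) (some (i + 5))) with hL
  have hA : pvLoopA ex (PySem.List.pyRange 0 (cs.length : Int) 1) PySem.Set.empty = true ↔ L.Nodup := by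
    rw [pvLoopA_iff]
    simp [PySem.Set.empty, hL]
  have hperm : (PySem.List.sorted L (fun x => x) false).Perm L := PySem.List.sorted_perm ..
  have hsl : PySem.List.sorted L (fun x : List Char => x) false
      = @PySem.List.sorted (List Char) (List Char) List.instLinearOrder.toLT
          LinearOrder.toDecidableLT L (fun x => x) false := by
    congr 1
  have hB : pvScanAdj (PySem.List.sorted L (fun x => x) false) = true ↔ L.Nodup := by
    rw [hsl, pvScanAdj_iff _ (PySem.List.sorted_pairwise L (fun x => x))]
    exact (hsl ▸ hperm : (@PySem.List.sorted (List Char) (List Char) List.instLinearOrder.toLT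
      LinearOrder.toDecidableLT L (fun x => x) false).Perm L).nodup_iff
  rw [Bool.eq_iff_iff, hA, hB]

-- ===== VERDICT (by name: the statement is the Claim_ definition above) =====
theorem filterDiffSlicesV2_spec : Claim_equal_filterDiffSlicesV2 := by
  intro theStr _
  exact filterDiffSlicesV2_eq theStr
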